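-- pv_equiv track=rewrite | github.com/rushton3179/CodeEval-Solutions | String_Search/string_search.py | remove_before
-- ===== SOURCE A (Python) =====
-- def remove_before(longer, shorter):
--         for i in range(len(longer)):
--             if longer[i] == shorter[0]:
--                 match = False
--                 if len(shorter) + i <= len(longer):
--                     for j in range(len(shorter)):
--                         if shorter[j] != longer[i + j]:
--                             match = False
--                             break
--                         else:
--                             match = True
--                 if match:
--                     break_point = i + len(shorter)
--                     return longer[break_point-1:]
--         return None
-- ===== SOURCE B (Python) =====
-- def remove_before(longer, shorter):
--     idx = longer.find(shorter)
--     if idx == -1: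
--         return None
--     return longer[idx + len(shorter) - 1:]
-- ===== Notes on version B (the rewrite author's own statement) =====
-- stated objective: faster
-- what changed: Replaces the hand-written character-by-character nested scan with a single str.find call for the first-occurrence index followed by one slice.
-- outside the precondition, e.g. on remove_before('ab', ''): A raises IndexError, B returns 'b'; on remove_before('', ''): A returns None, B returns ''
import Mathlib
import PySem

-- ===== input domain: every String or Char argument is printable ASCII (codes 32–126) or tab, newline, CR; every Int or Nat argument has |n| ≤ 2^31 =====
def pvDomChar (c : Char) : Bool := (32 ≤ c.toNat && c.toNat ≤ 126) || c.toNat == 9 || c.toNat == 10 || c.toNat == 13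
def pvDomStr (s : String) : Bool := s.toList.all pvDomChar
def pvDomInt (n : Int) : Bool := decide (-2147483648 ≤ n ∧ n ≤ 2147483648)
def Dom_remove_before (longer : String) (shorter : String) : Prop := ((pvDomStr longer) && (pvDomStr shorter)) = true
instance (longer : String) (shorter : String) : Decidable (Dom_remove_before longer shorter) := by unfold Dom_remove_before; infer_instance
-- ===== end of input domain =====

-- B replaces A's hand-written nested scan by str.find + one slice (measurably faster
-- constant factor; same first-occurrence semantics).

-- ===== PORT A =====
-- inner 'for j in range(len(shorter))' loop of A, carrying the running 'match' flag
def pvA_inner (l s : List Char) (i j : Nat) (mtch : Bool) : Bool :=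
  if j < s.length then
    if PySem.List.pyGetD s (j : Int) ' ' ≠ PySem.List.pyGetD l ((i + j : Nat) : Int) ' ' then
      false
    else
      pvA_inner l s i (j + 1) true
  else mtch
termination_by s.length - j

-- outer 'for i in range(len(longer))' loop of A
def pvA_outer (l s : List Char) (i : Nat) : Option String :=
  if i < l.length then
    if PySem.List.pyGetD l (i : Int) ' ' = PySem.List.pyGetD s (0 : Int) ' ' then
      let mtch := if s.length + i ≤ l.length then pvA_inner l s i 0 false else false
      if mtch then
        some (String.ofList (PySem.List.slice l (some ((i : Int) + (s.length : Int) - 1)) none))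
      else pvA_outer l s (i + 1)
    else pvA_outer l s (i + 1)
  else none
termination_by l.length - i

def remove_before (longer : String) (shorter : String) : Option String :=
  pvA_outer longer.toList shorter.toList 0

-- ===== PORT B =====
def remove_before_alt (longer : String) (shorter : String) : Option String :=
  let idx := PySem.Str.find longer shorter
  if idx = -1 then none
  else some (String.ofList
    (PySem.List.slice longer.toList (some (idx + (shorter.toList.length : Int) - 1)) none))

-- ===== PRECONDITION & SPEC =====
-- Pre_ excludes empty shorter: there A raises IndexError on shorter[0] whenever longer is
-- nonempty, and on the degenerate ("","") A's None is an accident of a loop that never runs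
-- (B returns "").
def Pre_remove_before (longer : String) (shorter : String) : Prop := shorter ≠ ""
instance (longer : String) (shorter : String) : Decidable (Pre_remove_before longer shorter) := by
  unfold Pre_remove_before; infer_instance
def pvWitness_remove_before : String × String := ("hello world", "o w")

def Spec_remove_before (longer : String) (shorter : String) (out : Option String) : Prop :=
  out = remove_before_alt longer shorter
instance (longer : String) (shorter : String) (out : Option String) : Decidable (Spec_remove_before longer shorter out) := by unfold Spec_remove_before; infer_instance

-- ===== CLAIM (what is proved, stated in full; the proofs are below) =====
def Claim_equal_remove_before : Prop := ∀ (longer : String) (shorter : String), Dom_remove_before longer shorter → Pre_remove_before longer shorter → Spec_remove_before longer shorter (remove_before longer shorter)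

-- ===== LEMMAS AND PROOFS =====

-- The inner loop decides elementwise equality of s[j..] with l[i+j..].
lemma pvA_inner_spec (l s : List Char) (i : Nat) (hfit : i + s.length ≤ l.length) :
    ∀ j mtch, (pvA_inner l s i j mtch = true ↔
      ((mtch = true ∨ j < s.length) ∧
        ∀ j', j ≤ j' → (h : j' < s.length) → s[j'] = l[i + j']'(by omega))) := by
  intro j
  induction' hk : s.length - j with k ih generalizing j
  · intro mtch
    have hj : ¬ j < s.length := by omega
    rw [pvA_inner]
    simp only [if_neg hj]
    constructor
    · intro h; exact ⟨Or.inl h, fun j' h1 h2 => absurd (lt_of_le_of_lt h1 h2) (by omega)⟩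
    · rintro ⟨h | h, -⟩
      · exact h
      · exact absurd h hj
  · intro mtch
    have hj : j < s.length := by omega
    have hij : i + j < l.length := by omega
    rw [pvA_inner]
    simp only [if_pos hj, PySem.List.pyGetD_natCast, List.getD_eq_getElem _ _ hj,
      List.getD_eq_getElem _ _ hij]
    by_cases heq : s[j] = l[i + j]
    · simp only [heq, ne_eq, not_true_eq_false, if_false]
      rw [ih (j + 1) (by omega) true]
      constructor
      · rintro ⟨-, h⟩
        refine ⟨Or.inr hj, fun j' h1 h2 => ?_⟩
        rcases eq_or_lt_of_le h1 with rfl | h1'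
        · exact heq
        · exact h j' h1' h2
      · rintro ⟨-, h⟩
        exact ⟨Or.inl rfl, fun j' h1 h2 => h j' (by omega) h2⟩
    · simp only [ne_eq, heq, not_false_eq_true, if_true]
      constructor
      · intro h; exact absurd h (by simp)
      · rintro ⟨-, h⟩
        exact absurd (h j le_rfl hj) heq

-- Started with mtch = false at j = 0 (s nonempty, fit guaranteed): prefix test.
lemma pvA_inner_prefix (l s : List Char) (i : Nat) (hs : s ≠ []) (hfit : i + s.length ≤ l.length) :
    (pvA_inner l s i 0 false = true ↔ s <+: l.drop i) := by
  rw [pvA_inner_spec l s i hfit 0 false]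
  have hs1 : 0 < s.length := List.length_pos_iff.mpr hs
  constructor
  · rintro ⟨-, h⟩
    rw [List.prefix_iff_eq_take]
    apply List.ext_getElem (by simp; omega)
    intro j h1 h2
    rw [List.getElem_take, List.getElem_drop]
    exact h j (Nat.zero_le j) h1
  · intro hpre
    refine ⟨Or.inr hs1, fun j' _ hj' => ?_⟩
    rw [hpre.getElem hj', List.getElem_drop]
-- outer loop: no occurrence at or after i gives None
lemma pvA_outer_none (l s : List Char) (hs : s ≠ []) :
    ∀ i, (∀ k, i ≤ k → ¬ s <+: l.drop k) → pvA_outer l s i = none := by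
  intro i
  induction' hk : l.length - i with k ih generalizing i <;> intro hno
  · rw [pvA_outer]
    simp only [if_neg (show ¬ i < l.length by omega)]
  · have hi : i < l.length := by omega
    have hnp : ¬ s <+: l.drop i := hno i le_rfl
    have hrec : pvA_outer l s (i + 1) = none :=
      ih (i + 1) (by omega) (fun k h1 => hno k (by omega))
    rw [pvA_outer]
    simp only [if_pos hi]
    by_cases hhead : PySem.List.pyGetD l (i : Int) ' ' = PySem.List.pyGetD s (0 : Int) ' '
    · have hm : (if s.length + i ≤ l.length then pvA_inner l s i 0 false else false) = false := by
        split_ifs with hfit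
        · exact Bool.eq_false_iff.mpr
            (fun h => hnp ((pvA_inner_prefix l s i hs (by omega)).mp h))
        · rfl
      simp only [if_pos hhead, hm, Bool.false_eq_true, if_false, hrec]
    · simp only [if_neg hhead, hrec]

-- outer loop: k0 the first occurrence at or after i gives the suffix from k0 + len s - 1
lemma pvA_outer_some (l s : List Char) (hs : s ≠ []) :
    ∀ i k0, i ≤ k0 → s <+: l.drop k0 → (∀ k, i ≤ k → k < k0 → ¬ s <+: l.drop k) →
      pvA_outer l s i =
        some (String.ofList
          (PySem.List.slice l (some ((k0 : Int) + (s.length : Int) - 1)) none)) := by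
  intro i
  induction' hk : l.length - i with k ih generalizing i <;> intro k0 hik hp hmin
  · have hle := hp.length_le
    have hs1 : 0 < s.length := List.length_pos_iff.mpr hs
    simp only [List.length_drop] at hle
    omega
  · have hi : i < l.length := by omega
    rw [pvA_outer]
    simp only [if_pos hi]
    rcases eq_or_lt_of_le hik with rfl | hlt
    · have hle := hp.length_le
      have hs1 : 0 < s.length := List.length_pos_iff.mpr hs
      simp only [List.length_drop] at hle
      have hfit : s.length + i ≤ l.length := by omega
      have hhead : PySem.List.pyGetD l (i : Int) ' ' = PySem.List.pyGetD s (0 : Int) ' ' := by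
        simp only [PySem.List.pyGetD_natCast, PySem.List.pyGetD_zero,
          List.getD_eq_getElem _ _ hi, List.getD_eq_getElem _ _ hs1]
        rw [hp.getElem hs1, List.getElem_drop]; simp
      have hin : pvA_inner l s i 0 false = true :=
        (pvA_inner_prefix l s i hs (by omega)).mpr hp
      simp only [if_pos hhead, if_pos hfit, hin, if_true]
    · have hnp : ¬ s <+: l.drop i := hmin i le_rfl hlt
      have hrec := ih (i + 1) (by omega) k0 (by omega) hp
        (fun k h1 h2 => hmin k (by omega) h2)
      by_cases hhead : PySem.List.pyGetD l (i : Int) ' ' = PySem.List.pyGetD s (0 : Int) ' '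
      · have hm : (if s.length + i ≤ l.length then pvA_inner l s i 0 false else false) = false := by
          split_ifs with hfit
          · exact Bool.eq_false_iff.mpr
              (fun h => hnp ((pvA_inner_prefix l s i hs (by omega)).mp h))
          · rfl
        simp only [if_pos hhead, hm, Bool.false_eq_true, if_false, hrec]
      · simp only [if_neg hhead, hrec]

-- ===== VERDICT (by name: the statement is the Claim_ definition above) =====
theorem remove_before_spec : Claim_equal_remove_before := by
  intro longer shorter _ hpre
  unfold Spec_remove_before remove_before remove_before_alt
  have hs : shorter.toList ≠ [] := fun h => hpre (String.toList_eq_nil_iff.mp h)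
  simp only [PySem.Str.find_eq]
  by_cases hfind : PySem.Chars.find longer.toList shorter.toList = -1
  · rw [hfind]
    simp only [if_true]
    apply pvA_outer_none _ _ hs
    intro kk _ hpk
    have hinf : shorter.toList <:+: longer.toList := by
      rw [← PySem.Chars.isIn_iff_infix]
      exact (PySem.Chars.exists_prefix_drop_iff_isIn _ _).mp ⟨kk, hpk⟩
    exact (((PySem.Chars.find_eq_neg_one_iff _ _).mp hfind)) hinf
  · have h0 : 0 ≤ PySem.Chars.find longer.toList shorter.toList := by
      have := PySem.Chars.neg_one_le_find longer.toList shorter.toList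
      omega
    obtain ⟨hp, hmin⟩ := PySem.Chars.find_spec (s := longer.toList) (sub := shorter.toList) h0
    rw [pvA_outer_some longer.toList shorter.toList hs 0
      (PySem.Chars.find longer.toList shorter.toList).toNat (Nat.zero_le _) hp
      (fun k _ hk => hmin k hk)]
    rw [if_neg hfind]
    rw [Int.toNat_of_nonneg h0]
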